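-- pv_equiv track=rewrite | github.com/SylvainDe/aoc2021 | day17.py | x_position_slow
-- ===== SOURCE A (Python) =====
-- def x_position_slow(vx, step):
--     x = 0
--     for s in range(step):
--         x += vx
--         if vx > 0:
--             vx -= 1
--         elif vx < 0:
--             vx += 1
--     return x
-- ===== SOURCE B (Python) =====
-- def x_position_slow(vx, step):
--     # closed form: the first min(step, |vx|) moves form an arithmetic series, then x stops
--     n = max(step, 0)
--     a = abs(vx)
--     k = min(n, a)
--     s = k * (2 * a - k + 1) // 2
--     return s if vx >= 0 else -s
-- ===== Notes on version B (the rewrite author's own statement) =====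
-- stated objective: faster
-- what changed: Replaces the step-by-step simulation loop by a closed-form arithmetic-series formula over min(step, |vx|) decaying moves.
import Mathlib
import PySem

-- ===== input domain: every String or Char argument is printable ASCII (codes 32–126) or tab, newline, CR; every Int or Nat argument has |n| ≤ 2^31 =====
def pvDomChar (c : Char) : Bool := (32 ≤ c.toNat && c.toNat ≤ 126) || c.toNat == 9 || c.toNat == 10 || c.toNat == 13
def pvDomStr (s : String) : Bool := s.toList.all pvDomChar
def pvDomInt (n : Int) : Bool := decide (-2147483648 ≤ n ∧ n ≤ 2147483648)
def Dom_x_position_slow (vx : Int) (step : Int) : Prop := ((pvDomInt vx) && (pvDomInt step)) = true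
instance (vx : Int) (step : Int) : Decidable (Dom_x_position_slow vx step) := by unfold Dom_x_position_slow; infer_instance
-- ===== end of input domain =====

-- B replaces A's O(step) simulation loop by an O(1) closed-form arithmetic-series formula.

-- ===== PORT A =====
def x_position_slow (vx : Int) (step : Int) : Int :=
  ((PySem.List.pyRange 0 step 1).foldl
    (fun (st : Int × Int) _ =>
      (st.1 + st.2,
       if st.2 > 0 then st.2 - 1 else if st.2 < 0 then st.2 + 1 else st.2))
    (0, vx)).1

-- ===== PORT B =====
def x_position_slow_alt (vx : Int) (step : Int) : Int :=
  let n := max step 0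
  let a := |vx|
  let k := min n a
  let s := PySem.Int.floordiv (k * (2 * a - k + 1)) 2
  if vx ≥ 0 then s else -s

-- ===== PRECONDITION & SPEC =====
def Spec_x_position_slow (vx : Int) (step : Int) (out : Int) : Prop := out = x_position_slow_alt vx step
instance (vx : Int) (step : Int) (out : Int) : Decidable (Spec_x_position_slow vx step out) := by unfold Spec_x_position_slow; infer_instance

-- ===== CLAIM (what is proved, stated in full; the proofs are below) =====
def Claim_equal_x_position_slow : Prop := ∀ (vx : Int) (step : Int), Dom_x_position_slow vx step → Spec_x_position_slow vx step (x_position_slow vx step)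

-- ===== LEMMAS AND PROOFS =====

def pvStep (st : Int × Int) : Int × Int :=
  (st.1 + st.2,
   if st.2 > 0 then st.2 - 1 else if st.2 < 0 then st.2 + 1 else st.2)

-- the loop body ignores the range element, so the fold only depends on the list length
lemma pvFoldl_const (l : List Int) (st : Int × Int) :
    l.foldl (fun s (_ : Int) => pvStep s) st = pvStep^[l.length] st := by
  induction l generalizing st with
  | nil => simp
  | cons h t ih => simp [List.foldl, ih, Function.iterate_succ_apply]

-- doubled closed form for m iterations starting from (x, v)
lemma pvIter_fst (m : Nat) (v x : Int) :
    2 * (pvStep^[m] (x, v)).1 =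
      2 * x + (if v ≥ 0 then 1 else -1) *
        (min (m : Int) |v| * (2 * |v| - min (m : Int) |v| + 1)) := by
  induction m generalizing v x with
  | zero =>
    have h0 : min (0 : Int) |v| = 0 := by
      have := abs_nonneg v; omega
    push_cast; rw [h0]; simp
  | succ m ih =>
    rw [Function.iterate_succ_apply]
    rcases lt_trichotomy v 0 with hv | hv | hv
    · have hstep : pvStep (x, v) = (x + v, v + 1) := by
        simp [pvStep]; omega
      rw [hstep, ih]
      by_cases h1 : v = -1
      · subst h1
        have h2 : min (m : Int) |(-1 : Int) + 1| = 0 := by simp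
        have h3 : min ((m : Nat) + 1 : Int) |(-1 : Int)| = 1 := by
          rw [show |(-1 : Int)| = 1 by decide]; omega
        push_cast
        push_cast at h2 h3
        rw [h2, h3]
        ring
      · have hle : v ≤ -2 := by omega
        have hv1 : |v + 1| = -v - 1 := by rw [abs_of_nonpos (by omega)]; ring
        have hv0 : |v| = -v := abs_of_neg hv
        have hk : min ((m : Nat) + 1 : Int) |v| = min (m : Int) |v + 1| + 1 := by
          rw [hv0, hv1]; push_cast; omega
        have hs1 : ¬ (v + 1 ≥ 0) := by omega
        have hs0 : ¬ (v ≥ 0) := by omega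
        push_cast
        push_cast at hk
        rw [if_neg hs1, if_neg hs0, hk, hv0, hv1]
        ring
    · subst hv
      have hstep : pvStep (x, 0) = (x + 0, 0) := by simp [pvStep]
      rw [hstep, ih]
      have h2 : min ((m : Nat) + 1 : Int) |(0 : Int)| = 0 := by
        rw [abs_zero]; omega
      have h3 : min (m : Int) |(0 : Int)| = 0 := by
        rw [abs_zero]; omega
      push_cast at h2 ⊢
      rw [h2, h3]
      ring
    · have hstep : pvStep (x, v) = (x + v, v - 1) := by
        simp [pvStep]; omega
      rw [hstep, ih]
      have hv1 : |v - 1| = v - 1 := abs_of_nonneg (by omega)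
      have hv0 : |v| = v := abs_of_pos hv
      have hk : min ((m : Nat) + 1 : Int) |v| = min (m : Int) |v - 1| + 1 := by
        rw [hv0, hv1]; omega
      have hs1 : (v - 1 ≥ 0) := by omega
      have hs0 : (v ≥ 0) := by omega
      push_cast
      push_cast at hk
      rw [if_pos hs1, if_pos hs0, hk, hv0, hv1]
      ring

lemma pvFloordiv_two_mul (s : Int) : PySem.Int.floordiv (2 * s) 2 = s := by
  rw [PySem.Int.floordiv_eq_ediv_of_pos (by norm_num)]
  omega

-- ===== VERDICT (by name: the statement is the Claim_ definition above) =====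
theorem x_position_slow_spec : Claim_equal_x_position_slow := by
  intro vx step _
  unfold Spec_x_position_slow x_position_slow x_position_slow_alt
  rw [show (fun (st : Int × Int) (_ : Int) =>
      (st.1 + st.2,
       if st.2 > 0 then st.2 - 1 else if st.2 < 0 then st.2 + 1 else st.2)) =
      (fun s (_ : Int) => pvStep s) from rfl, pvFoldl_const]
  have hlen : ((PySem.List.pyRange 0 step 1).length : Int) = max step 0 := by
    rw [PySem.List.length_pyRange_one]; omega
  have h := pvIter_fst (PySem.List.pyRange 0 step 1).length vx 0
  rw [hlen] at h
  set k := min (max step 0) |vx| with hk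
  set R := (pvStep^[(PySem.List.pyRange 0 step 1).length] ((0 : Int), vx)).1 with hR
  by_cases hv : vx ≥ 0
  · rw [if_pos hv] at h ⊢
    have : k * (2 * |vx| - k + 1) = 2 * R := by omega
    rw [this, pvFloordiv_two_mul]
  · rw [if_neg hv] at h ⊢
    have : k * (2 * |vx| - k + 1) = 2 * (-R) := by omega
    rw [this, pvFloordiv_two_mul]
    omega
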